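-- pv_equiv track=rewrite | github.com/declan-hates-dp/prg1-assg | Sundrop_Caves.py | generate_view
-- ===== SOURCE A (Python) =====
-- def generate_view(game_map, player):
--     view_map = [[' ',' ',' '],
--                 [' ','M',' '],
--                 [' ',' ',' ']]
--     x, y = player['x'], player['y']
--     if y == 0:
--         view_map[0][0] = "#"
--         view_map[0][1] = "#"
--         view_map[0][2] = "#"
--     if y == len(game_map) - 1:
--         view_map[2][0] = "#"
--         view_map[2][1] = "#"
--         view_map[2][2] = "#"
--     if x == 0:
--         view_map[0][0] = "#"
--         view_map[1][0] = "#"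
--         view_map[2][0] = "#"
--     if x == len(game_map[0]) - 1:
--         view_map[0][2] = "#"
--         view_map[1][2] = "#"
--         view_map[2][2] = "#"
--     for row in range(len(view_map)):
--         for i in range(len(view_map[row])):
--             if view_map[row][i] != '#' and view_map[row][i] != 'M':
--                 view_map[row][i] = game_map[y - 1 + row][x - 1 + i]
--     return view_map
-- ===== SOURCE B (Python) =====
-- def generate_view(game_map, player):
--     x, y = player['x'], player['y']
--     left = x == 0
--     right = x == len(game_map[0]) - 1
--
--     def strip(ry, mid):
--         return ['#' if left else game_map[ry][x - 1],
--                 mid,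
--                 '#' if right else game_map[ry][x + 1]]
--
--     wall = ['#', '#', '#']
--     return [wall if y == 0 else strip(y - 1, game_map[y - 1][x]),
--             strip(y, 'M'),
--             wall[:] if y == len(game_map) - 1 else strip(y + 1, game_map[y + 1][x])]
-- ===== Notes on version B (the rewrite author's own statement) =====
-- stated objective: simpler
-- what changed: A allocates a mutable 3x3 placeholder grid, stamps '#' edge rows/columns in four mutation blocks, then runs a nested fill loop over all 9 cells overwriting every cell still holding the placeholder flag; B has no grid, no flags and no loops: it assembles the three rows directly, each edge row collapsing to a constant wall ['#','#','#'] and every other row produced by one helper that masks only its left/right cell.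
import Mathlib
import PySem

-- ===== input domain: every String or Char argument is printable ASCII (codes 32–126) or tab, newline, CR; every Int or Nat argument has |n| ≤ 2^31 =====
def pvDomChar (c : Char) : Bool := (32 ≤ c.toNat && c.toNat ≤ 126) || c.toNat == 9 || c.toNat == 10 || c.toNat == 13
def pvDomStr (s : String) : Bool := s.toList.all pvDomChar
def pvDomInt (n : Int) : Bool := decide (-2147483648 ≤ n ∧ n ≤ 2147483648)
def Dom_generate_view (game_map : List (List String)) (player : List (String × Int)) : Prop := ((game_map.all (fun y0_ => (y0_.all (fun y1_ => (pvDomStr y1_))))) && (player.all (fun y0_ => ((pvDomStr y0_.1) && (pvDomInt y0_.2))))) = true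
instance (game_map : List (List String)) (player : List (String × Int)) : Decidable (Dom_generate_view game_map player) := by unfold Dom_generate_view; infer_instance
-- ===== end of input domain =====

-- B drops A's placeholder grid, mutation blocks and fill loop: it assembles the three rows
-- directly (edge rows are the constant wall, others come from one masked-strip helper);
-- same return value everywhere A returns (objective: simpler).

-- ===== PORT A =====

-- view_map[r][i] = v  (in-place assignment on the 3x3 list of lists)
def gvSet (vm : List (List String)) (r i : Nat) (v : String) : List (List String) :=
  vm.modify r (fun rowl => rowl.set i v)

-- game_map[ry][rx] with Python indexing; "!" stands for the IndexError case, which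
-- Pre_generate_view excludes (both ports transliterate this same subscript expression)
def gvFetch (game_map : List (List String)) (ry rx : Int) : String :=
  (PySem.List.pyGet? ((PySem.List.pyGet? game_map ry).getD []) rx).getD "!"

def generate_view (game_map : List (List String)) (player : List (String × Int)) : List (List String) :=
  let view0 : List (List String) := [[" ", " ", " "], [" ", "M", " "], [" ", " ", " "]]
  let x := PySem.Dict.getD (PySem.Dict.mk player) "x" 0
  let y := PySem.Dict.getD (PySem.Dict.mk player) "y" 0
  let v1 := if y = 0 then gvSet (gvSet (gvSet view0 0 0 "#") 0 1 "#") 0 2 "#" else view0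
  let v2 := if y = (game_map.length : Int) - 1 then gvSet (gvSet (gvSet v1 2 0 "#") 2 1 "#") 2 2 "#" else v1
  let v3 := if x = 0 then gvSet (gvSet (gvSet v2 0 0 "#") 1 0 "#") 2 0 "#" else v2
  let v4 := if x = (((game_map.head?).getD []).length : Int) - 1 then gvSet (gvSet (gvSet v3 0 2 "#") 1 2 "#") 2 2 "#" else v3
  (List.range v4.length).foldl (fun vm row =>
    (List.range (vm.getD row []).length).foldl (fun vm i =>
      let cur := (vm.getD row []).getD i ""
      if cur ≠ "#" ∧ cur ≠ "M" then
        gvSet vm row i (gvFetch game_map (y - 1 + (row : Int)) (x - 1 + (i : Int)))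
      else vm) vm) v4

-- ===== PORT B =====

-- ['#' if left else game_map[ry][x-1], mid, '#' if right else game_map[ry][x+1]]
def gvStrip (game_map : List (List String)) (x : Int) (left right : Bool) (ry : Int) (mid : String) : List String :=
  [if left then "#" else gvFetch game_map ry (x - 1),
   mid,
   if right then "#" else gvFetch game_map ry (x + 1)]

def generate_view_alt (game_map : List (List String)) (player : List (String × Int)) : List (List String) :=
  let x := PySem.Dict.getD (PySem.Dict.mk player) "x" 0
  let y := PySem.Dict.getD (PySem.Dict.mk player) "y" 0
  let left := x = 0
  let right := x = (((game_map.head?).getD []).length : Int) - 1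
  let wall : List String := ["#", "#", "#"]
  [if y = 0 then wall else gvStrip game_map x left right (y - 1) (gvFetch game_map (y - 1) x),
   gvStrip game_map x left right y "M",
   if y = (game_map.length : Int) - 1 then wall else gvStrip game_map x left right (y + 1) (gvFetch game_map (y + 1) x)]

-- ===== PRECONDITION & SPEC =====
-- Pre_ = exactly the inputs where Python A returns normally: the map is nonempty (A reads
-- game_map[0]), player has 'x' and 'y' keys, and every view cell that is not the center and
-- not stamped '#' by an edge condition addresses a valid (possibly negative) Python index.
def Pre_generate_view (game_map : List (List String)) (player : List (String × Int)) : Prop :=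
  game_map ≠ [] ∧ (PySem.Dict.get? (PySem.Dict.mk player) "x").isSome ∧ (PySem.Dict.get? (PySem.Dict.mk player) "y").isSome ∧
  (∀ r ∈ ([0, 1, 2] : List Int), ∀ c ∈ ([0, 1, 2] : List Int),
    ¬(r = 1 ∧ c = 1) →
    ¬((r = 0 ∧ PySem.Dict.getD (PySem.Dict.mk player) "y" 0 = 0) ∨
      (r = 2 ∧ PySem.Dict.getD (PySem.Dict.mk player) "y" 0 = (game_map.length : Int) - 1) ∨
      (c = 0 ∧ PySem.Dict.getD (PySem.Dict.mk player) "x" 0 = 0) ∨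
      (c = 2 ∧ PySem.Dict.getD (PySem.Dict.mk player) "x" 0 = (((game_map.head?).getD []).length : Int) - 1)) →
    ((PySem.List.pyGet? game_map (PySem.Dict.getD (PySem.Dict.mk player) "y" 0 - 1 + r)).bind
      (fun rowl => PySem.List.pyGet? rowl (PySem.Dict.getD (PySem.Dict.mk player) "x" 0 - 1 + c))).isSome)
instance (game_map : List (List String)) (player : List (String × Int)) : Decidable (Pre_generate_view game_map player) := by unfold Pre_generate_view; infer_instance

def pvWitness_generate_view : List (List String) × (List (String × Int)) :=
  ([["a", "b", "c"], ["d", "e", "f"], ["g", "h", "i"]], [("x", 1), ("y", 1)])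

def Spec_generate_view (game_map : List (List String)) (player : List (String × Int)) (out : List (List String)) : Prop := out = generate_view_alt game_map player
instance (game_map : List (List String)) (player : List (String × Int)) (out : List (List String)) : Decidable (Spec_generate_view game_map player out) := by unfold Spec_generate_view; infer_instance

-- ===== CLAIM (what is proved, stated in full; the proofs are below) =====
def Claim_equal_generate_view : Prop := ∀ (game_map : List (List String)) (player : List (String × Int)), Dom_generate_view game_map player → Pre_generate_view game_map player → Spec_generate_view game_map player (generate_view game_map player)

-- ===== LEMMAS AND PROOFS =====

-- index normalisation used to align the two ports' subscript arithmetic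
theorem int_sub_one_add_two (a : Int) : a - 1 + 2 = a + 1 := by ring

-- ===== VERDICT (by name: the statement is the Claim_ definition above) =====
set_option maxRecDepth 10000 in
set_option maxHeartbeats 2000000 in
theorem generate_view_spec : Claim_equal_generate_view := by
  intro gm player hdom hpre
  clear hdom hpre
  unfold Spec_generate_view generate_view generate_view_alt gvStrip
  dsimp only
  split_ifs <;>
    simp [gvSet, List.range_succ, List.modify, List.set, List.getD,
      int_sub_one_add_two, *] <;>
    simp_all
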